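-- pv_equiv track=rewrite | github.com/liyihann/pytorch-coviar | dataset.py | get_gop_pos_consecutive
-- ===== SOURCE A (Python) =====
-- GOP_SIZE = 12
--
-- def get_gop_pos_consecutive(frame_idx, representation,mv_stack_size):
--     gop_pos_list = []
--     gop_index = frame_idx // GOP_SIZE
--     gop_pos = frame_idx % GOP_SIZE
--     if representation in ['residual', 'mv']:
--         if gop_pos == 0:
--             gop_index -= 1
--             gop_pos = GOP_SIZE - 1
--         if gop_pos <= GOP_SIZE-mv_stack_size:
--             for i in range(0,mv_stack_size):
--                 gop_pos_list.append(gop_pos+i)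
--         else:
--             for i in range(1, mv_stack_size - (GOP_SIZE - gop_pos) + 1):
--                 gop_pos_list.append(gop_pos-i)
--             gop_pos_list.reverse()
--             for i in range(0,GOP_SIZE-gop_pos):
--                 gop_pos_list.append(gop_pos+i)
--     else: # dead entrance
--         gop_pos = 0
--         gop_pos_list.append(gop_pos)
--     return gop_index, gop_pos_list
-- ===== SOURCE B (Python) =====
-- GOP_SIZE = 12
--
-- def get_gop_pos_consecutive(frame_idx, representation, mv_stack_size):
--     gop_index, gop_pos = divmod(frame_idx, GOP_SIZE)
--     if representation in ('residual', 'mv'):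
--         if gop_pos == 0:
--             gop_index -= 1
--             gop_pos = GOP_SIZE - 1
--         start = min(gop_pos, GOP_SIZE - mv_stack_size)
--         return gop_index, list(range(start, start + mv_stack_size))
--     return gop_index, [0]
-- ===== Notes on version B (the rewrite author's own statement) =====
-- stated objective: simpler
-- what changed: Replaces the two append loops plus reverse in the residual/mv branch by one closed-form clamped range: start = min(gop_pos, GOP_SIZE - mv_stack_size), list = range(start, start + mv_stack_size).
import Mathlib
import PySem

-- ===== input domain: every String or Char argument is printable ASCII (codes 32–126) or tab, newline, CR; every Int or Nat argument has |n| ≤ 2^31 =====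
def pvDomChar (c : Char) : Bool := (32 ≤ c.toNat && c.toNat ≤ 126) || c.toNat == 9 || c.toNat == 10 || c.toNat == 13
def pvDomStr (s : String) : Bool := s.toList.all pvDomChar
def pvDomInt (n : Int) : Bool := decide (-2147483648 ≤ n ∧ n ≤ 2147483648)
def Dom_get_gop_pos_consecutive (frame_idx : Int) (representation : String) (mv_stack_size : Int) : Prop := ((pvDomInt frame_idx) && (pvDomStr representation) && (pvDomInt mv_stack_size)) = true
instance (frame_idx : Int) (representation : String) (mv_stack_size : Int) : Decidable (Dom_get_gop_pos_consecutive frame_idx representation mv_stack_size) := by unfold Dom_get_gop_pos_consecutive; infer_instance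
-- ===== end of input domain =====

-- B replaces A's two append loops plus reverse by one closed-form clamped range (objective: simpler).

-- ===== PORT A =====
def get_gop_pos_consecutive (frame_idx : Int) (representation : String) (mv_stack_size : Int) : Int × List Int :=
  let gop_pos_list : List Int := []
  let gop_index := PySem.Int.floordiv frame_idx 12
  let gop_pos := PySem.Int.mod frame_idx 12
  if representation = "residual" ∨ representation = "mv" then
    let gop_index := if gop_pos = 0 then gop_index - 1 else gop_index
    let gop_pos := if gop_pos = 0 then (12 : Int) - 1 else gop_pos
    if gop_pos ≤ 12 - mv_stack_size then
      let gop_pos_list := (PySem.List.pyRange 0 mv_stack_size 1).foldl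
        (fun acc i => acc ++ [gop_pos + i]) gop_pos_list
      (gop_index, gop_pos_list)
    else
      let gop_pos_list := (PySem.List.pyRange 1 (mv_stack_size - (12 - gop_pos) + 1) 1).foldl
        (fun acc i => acc ++ [gop_pos - i]) gop_pos_list
      let gop_pos_list := gop_pos_list.reverse
      let gop_pos_list := (PySem.List.pyRange 0 (12 - gop_pos) 1).foldl
        (fun acc i => acc ++ [gop_pos + i]) gop_pos_list
      (gop_index, gop_pos_list)
  else
    let gop_pos : Int := 0
    (gop_index, gop_pos_list ++ [gop_pos])

-- ===== PORT B =====
def get_gop_pos_consecutive_alt (frame_idx : Int) (representation : String) (mv_stack_size : Int) : Int × List Int :=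
  let gop_index := PySem.Int.floordiv frame_idx 12
  let gop_pos := PySem.Int.mod frame_idx 12
  if representation = "residual" ∨ representation = "mv" then
    let gop_index := if gop_pos = 0 then gop_index - 1 else gop_index
    let gop_pos := if gop_pos = 0 then (12 : Int) - 1 else gop_pos
    let start := min gop_pos (12 - mv_stack_size)
    (gop_index, PySem.List.pyRange start (start + mv_stack_size) 1)
  else
    (gop_index, [0])

-- ===== PRECONDITION & SPEC =====
def Spec_get_gop_pos_consecutive (frame_idx : Int) (representation : String) (mv_stack_size : Int) (out : Int × List Int) : Prop := out = get_gop_pos_consecutive_alt frame_idx representation mv_stack_size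
instance (frame_idx : Int) (representation : String) (mv_stack_size : Int) (out : Int × List Int) : Decidable (Spec_get_gop_pos_consecutive frame_idx representation mv_stack_size out) := by unfold Spec_get_gop_pos_consecutive; infer_instance

-- ===== CLAIM (what is proved, stated in full; the proofs are below) =====
def Claim_equal_get_gop_pos_consecutive : Prop := ∀ (frame_idx : Int) (representation : String) (mv_stack_size : Int), Dom_get_gop_pos_consecutive frame_idx representation mv_stack_size → Spec_get_gop_pos_consecutive frame_idx representation mv_stack_size (get_gop_pos_consecutive frame_idx representation mv_stack_size)

-- ===== LEMMAS AND PROOFS =====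

theorem foldl_append_map {α β : Type} (f : α → β) (l : List α) (init : List β) :
    l.foldl (fun acc i => acc ++ [f i]) init = init ++ l.map f := by
  induction l generalizing init with
  | nil => simp
  | cons x xs ih => simp [List.foldl, ih, List.append_assoc]

theorem map_add_pyRange (g a b : Int) :
    (PySem.List.pyRange a b 1).map (fun i => g + i) = PySem.List.pyRange (g + a) (g + b) 1 := by
  rw [PySem.List.pyRange_one, PySem.List.pyRange_one]
  have : g + b - (g + a) = b - a := by ring
  rw [this, List.map_map]
  apply List.map_congr_left
  intro k _
  simp
  ring

theorem map_sub_reverse (g t : Int) (_ht : 0 ≤ t) :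
    ((PySem.List.pyRange 1 (t + 1) 1).map (fun i => g - i)).reverse
      = PySem.List.pyRange (g - t) g 1 := by
  have h1 : (PySem.List.pyRange 1 (t + 1) 1).map (fun i => g - i)
      = PySem.List.pyRange (g - 1) (g - 1 - t) (-1) := by
    rw [PySem.List.pyRange_one, PySem.List.pyRange_neg_one]
    have : t + 1 - 1 = t := by ring
    rw [this]
    have : g - 1 - (g - 1 - t) = t := by ring
    rw [this, List.map_map]
    apply List.map_congr_left
    intro k _
    simp
    ring
  rw [h1, PySem.List.pyRange_neg_one_eq_reverse, List.reverse_reverse]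
  have h2 : g - 1 - t + 1 = g - t := by ring
  have h3 : g - 1 + 1 = g := by ring
  rw [h2, h3]

-- The core list identity: A's window-building equals B's clamped range, for gop_pos in 1..11.
theorem window_eq (g m : Int) (hg1 : 1 ≤ g) (hg2 : g ≤ 11) :
    (if g ≤ 12 - m then
      (PySem.List.pyRange 0 m 1).foldl (fun acc i => acc ++ [g + i]) []
     else
      (PySem.List.pyRange 0 (12 - g) 1).foldl (fun acc i => acc ++ [g + i])
        (((PySem.List.pyRange 1 (m - (12 - g) + 1) 1).foldl
            (fun acc i => acc ++ [g - i]) []).reverse))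
      = PySem.List.pyRange (min g (12 - m)) (min g (12 - m) + m) 1 := by
  split_ifs with h
  · -- g ≤ 12 - m : start = g
    rw [min_eq_left h, foldl_append_map, List.nil_append, map_add_pyRange]
    simp
  · -- g > 12 - m : start = 12 - m
    rw [not_le] at h
    rw [min_eq_right (le_of_lt h)]
    rw [foldl_append_map, foldl_append_map, List.nil_append]
    have hrw : m - (12 - g) + 1 = (m - 12 + g) + 1 := by ring
    rw [hrw, map_sub_reverse g (m - 12 + g) (by omega), map_add_pyRange]
    have h2 : g - (m - 12 + g) = 12 - m := by ring
    have h3 : g + 0 = g := by ring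
    have h4 : g + (12 - g) = (12 : Int) := by ring
    rw [h2, h3, h4]
    rw [← PySem.List.pyRange_one_append (12 - m) g 12 (by omega) (by omega)]
    have : (12 : Int) - m + m = 12 := by ring
    rw [this]

-- ===== VERDICT (by name: the statement is the Claim_ definition above) =====
theorem get_gop_pos_consecutive_spec : Claim_equal_get_gop_pos_consecutive := by
  intro frame_idx representation mv_stack_size _
  unfold Spec_get_gop_pos_consecutive get_gop_pos_consecutive get_gop_pos_consecutive_alt
  by_cases hr : representation = "residual" ∨ representation = "mv"
  · have hm0 : 0 ≤ PySem.Int.mod frame_idx 12 :=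
      PySem.Int.mod_nonneg (a := frame_idx) (b := 12) (by norm_num)
    have hm12 : PySem.Int.mod frame_idx 12 < 12 :=
      PySem.Int.mod_lt (a := frame_idx) (b := 12) (by norm_num)
    by_cases hz : PySem.Int.mod frame_idx 12 = 0
    · simp only [hr, hz, if_true]
      have hw := window_eq (12 - 1) mv_stack_size (by norm_num) (by norm_num)
      split_ifs at hw ⊢ with hb <;> exact congrArg (Prod.mk _) hw
    · simp only [hr, hz, if_true, ite_false]
      have hw := window_eq (PySem.Int.mod frame_idx 12) mv_stack_size (by omega) (by omega)
      split_ifs at hw ⊢ with hb <;> exact congrArg (Prod.mk _) hw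
  · simp [hr]
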